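-- pv_equiv track=rewrite | github.com/rossop/AdventOfCode | 2021/solutions/17.py | count_can_land_dx
-- ===== SOURCE A (Python) =====
-- from typing import Any, Dict, List, Optional, Set
--
-- def count_can_land_dx(step: int, minx: int, maxx: int) -> Set[int]:
--     """"""
--     total = set()
--     for dx in range(0, maxx + 1):
--         x = 0
--         odx = dx
--         for _ in range(step):
--             x += dx
--             if dx > 0:
--                 dx -= 1
--         if minx <= x <= maxx:
--             total.add(odx)
--     return total
-- ===== SOURCE B (Python) =====
-- def count_can_land_dx(step, minx, maxx):
--     # Closed-form final x per dx: dx decays by 1 each step until 0, so after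
--     # `step` steps x is a clamped arithmetic series sum; O(maxx) instead of O(maxx*step).
--     def final_x(dx):
--         n = min(max(step, 0), dx)
--         return n * dx - n * (n - 1) // 2
--     return {dx for dx in range(0, maxx + 1) if minx <= final_x(dx) <= maxx}
-- ===== Notes on version B (the rewrite author's own statement) =====
-- stated objective: faster
-- what changed: Replaces the per-dx simulation of `step` velocity-decay iterations with a closed-form clamped arithmetic-series sum, turning O(maxx*step) into O(maxx).
import Mathlib
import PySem

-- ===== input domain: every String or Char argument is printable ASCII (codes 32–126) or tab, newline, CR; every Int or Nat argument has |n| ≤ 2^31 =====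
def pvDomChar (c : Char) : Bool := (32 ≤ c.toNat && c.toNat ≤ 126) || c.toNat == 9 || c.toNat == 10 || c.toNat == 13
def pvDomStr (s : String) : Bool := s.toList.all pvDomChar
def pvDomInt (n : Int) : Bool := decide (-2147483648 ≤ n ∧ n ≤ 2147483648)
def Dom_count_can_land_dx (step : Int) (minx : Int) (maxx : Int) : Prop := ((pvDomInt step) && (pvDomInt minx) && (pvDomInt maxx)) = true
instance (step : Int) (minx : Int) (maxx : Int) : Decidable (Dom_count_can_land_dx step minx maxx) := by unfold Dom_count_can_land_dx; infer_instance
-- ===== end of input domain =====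

-- B replaces A's per-dx simulation of `step` iterations by a closed-form clamped
-- arithmetic-series sum (objective: faster, O(maxx) vs O(maxx*step)).

-- ===== PORT A =====
def count_can_land_dx (step : Int) (minx : Int) (maxx : Int) : List Int :=
  (PySem.List.pyRange 0 (maxx + 1) 1).foldl (fun total odx =>
    let p := (PySem.List.pyRange 0 step 1).foldl
      (fun (p : Int × Int) _ => (p.1 + p.2, if p.2 > 0 then p.2 - 1 else p.2)) (0, odx)
    if minx ≤ p.1 ∧ p.1 ≤ maxx then PySem.Set.add total odx else total)
    PySem.Set.empty

-- ===== PORT B =====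
def count_can_land_dx_alt (step : Int) (minx : Int) (maxx : Int) : List Int :=
  PySem.Set.ofList ((PySem.List.pyRange 0 (maxx + 1) 1).filter (fun dx =>
    let n := min (max step 0) dx
    let x := n * dx - PySem.Int.floordiv (n * (n - 1)) 2
    decide (minx ≤ x ∧ x ≤ maxx)))

-- ===== PRECONDITION & SPEC =====
def Spec_count_can_land_dx (step : Int) (minx : Int) (maxx : Int) (out : List Int) : Prop := out = count_can_land_dx_alt step minx maxx
instance (step : Int) (minx : Int) (maxx : Int) (out : List Int) : Decidable (Spec_count_can_land_dx step minx maxx out) := by unfold Spec_count_can_land_dx; infer_instance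

-- ===== CLAIM (what is proved, stated in full; the proofs are below) =====
def Claim_equal_count_can_land_dx : Prop := ∀ (step : Int) (minx : Int) (maxx : Int), Dom_count_can_land_dx step minx maxx → Spec_count_can_land_dx step minx maxx (count_can_land_dx step minx maxx)

-- ===== LEMMAS AND PROOFS =====

-- A's inner loop body, and its iteration.
def pvBody (p : Int × Int) : Int × Int := (p.1 + p.2, if p.2 > 0 then p.2 - 1 else p.2)

def pvIter : Nat → (Int × Int) → Int × Int
  | 0, p => p
  | k + 1, p => pvIter k (pvBody p)

-- A fold whose function ignores the elements is iteration of the body, length many times.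
theorem foldl_const_body (l : List Int) (p : Int × Int) :
    l.foldl (fun (p : Int × Int) _ => pvBody p) p = pvIter l.length p := by
  induction l generalizing p with
  | nil => rfl
  | cons a l ih => simp [List.foldl, pvIter, ih]

-- floordiv identity: m(m+1)/2 = m + m(m-1)/2 (both products are even).
theorem floordiv_tri_succ (m : Int) :
    PySem.Int.floordiv (m * (m + 1)) 2 = m + PySem.Int.floordiv (m * (m - 1)) 2 := by
  rw [PySem.Int.floordiv_eq_ediv_of_pos (by norm_num),
      PySem.Int.floordiv_eq_ediv_of_pos (by norm_num)]
  obtain ⟨u, hu⟩ := Int.even_mul_succ_self m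
  have hv : ∃ v, m * (m - 1) = v + v := by
    obtain ⟨v, h⟩ := Int.even_mul_succ_self (m - 1)
    exact ⟨v, by linarith [h]⟩
  obtain ⟨v, hv⟩ := hv
  have hdiff : m * (m + 1) - m * (m - 1) = 2 * m := by ring
  omega

-- Closed form of the iterated body: after k steps from (x, dx) with 0 ≤ dx,
-- x has grown by n*dx - n(n-1)/2 where n = min k dx.
theorem pvIter_closed (k : Nat) : ∀ (x dx : Int), 0 ≤ dx →
    (pvIter k (x, dx)).1 =
      x + (min (k : Int) dx) * dx - PySem.Int.floordiv ((min (k : Int) dx) * ((min (k : Int) dx) - 1)) 2 := by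
  induction k with
  | zero =>
    intro x dx hdx
    have : min (0 : Int) dx = 0 := by omega
    simp [pvIter, this, PySem.Int.floordiv]
  | succ k ih =>
    intro x dx hdx
    by_cases h : dx > 0
    · have hstep : pvIter (k + 1) (x, dx) = pvIter k (x + dx, dx - 1) := by
        simp [pvIter, pvBody, h]
      rw [hstep, ih (x + dx) (dx - 1) (by omega)]
      have hm : min ((k : Int) + 1) dx = min (k : Int) (dx - 1) + 1 := by omega
      set m := min (k : Int) (dx - 1) with hmdef
      rw [Nat.cast_succ, hm]
      have := floordiv_tri_succ m
      have hrw : (m + 1) * ((m + 1) - 1) = m * (m + 1) := by ring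
      rw [hrw, this]
      ring
    · have hdx0 : dx = 0 := by omega
      subst hdx0
      have hstep : pvIter (k + 1) (x, (0:Int)) = pvIter k (x + 0, 0) := by
        simp [pvIter, pvBody]
      rw [hstep, ih (x + 0) 0 le_rfl]
      have h1 : min ((k:Int)) (0:Int) = 0 := by omega
      have h2 : min (((k:Nat).succ : Int)) (0:Int) = 0 := by
        push_cast; omega
      rw [h1]
      push_cast at h2 ⊢
      rw [h2]
      simp

-- A's per-dx condition equals B's closed-form condition, for 0 ≤ dx.
theorem cond_eq (step minx maxx dx : Int) (hdx : 0 ≤ dx) :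
    (decide (minx ≤ ((PySem.List.pyRange 0 step 1).foldl
        (fun (p : Int × Int) _ => (p.1 + p.2, if p.2 > 0 then p.2 - 1 else p.2)) (0, dx)).1 ∧
      ((PySem.List.pyRange 0 step 1).foldl
        (fun (p : Int × Int) _ => (p.1 + p.2, if p.2 > 0 then p.2 - 1 else p.2)) (0, dx)).1 ≤ maxx)) =
    (let n := min (max step 0) dx
     let x := n * dx - PySem.Int.floordiv (n * (n - 1)) 2
     decide (minx ≤ x ∧ x ≤ maxx)) := by
  have hfold : (PySem.List.pyRange 0 step 1).foldl
      (fun (p : Int × Int) _ => (p.1 + p.2, if p.2 > 0 then p.2 - 1 else p.2)) (0, dx)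
      = pvIter (PySem.List.pyRange 0 step 1).length (0, dx) := by
    exact foldl_const_body _ _
  have hlen : ((PySem.List.pyRange 0 step 1).length : Int) = max step 0 := by
    rw [PySem.List.length_pyRange_one]; omega
  rw [hfold, pvIter_closed _ 0 dx hdx, hlen]
  simp

-- fold of conditional Set.add over a nodup list disjoint from acc appends the filter.
theorem foldl_add_if_filter (q : Int → Bool) :
    ∀ (l : List Int) (acc : List Int), l.Nodup → (∀ x ∈ l, x ∉ acc) →
    l.foldl (fun a x => if q x then PySem.Set.add a x else a) acc = acc ++ l.filter q := by
  intro l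
  induction l with
  | nil => intro acc _ _; simp
  | cons a l ih =>
    intro acc hnd hdisj
    simp only [List.nodup_cons] at hnd
    by_cases hq : q a
    · have hadd : PySem.Set.add acc a = acc ++ [a] := by
        have hna : a ∉ acc := hdisj a List.mem_cons_self
        simp [PySem.Set.add, hna]
      have := ih (acc ++ [a]) hnd.2 (by
        intro x hx
        simp only [List.mem_append, List.mem_singleton]
        rintro (h | rfl)
        · exact hdisj x (by simp [hx]) h
        · exact hnd.1 hx)
      simp [List.foldl, hq, hadd, this, List.append_assoc]
    · have := ih acc hnd.2 (fun x hx => hdisj x (by simp [hx]))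
      simp [List.foldl, hq, this]

-- ===== VERDICT (by name: the statement is the Claim_ definition above) =====
theorem count_can_land_dx_spec : Claim_equal_count_can_land_dx := by
  intro step minx maxx _
  unfold Spec_count_can_land_dx count_can_land_dx count_can_land_dx_alt
  have hnd := PySem.List.nodup_pyRange_one 0 (maxx + 1)
  have hfilter_nd : ((PySem.List.pyRange 0 (maxx + 1) 1).filter (fun dx =>
      let n := min (max step 0) dx
      let x := n * dx - PySem.Int.floordiv (n * (n - 1)) 2
      decide (minx ≤ x ∧ x ≤ maxx))).Nodup := hnd.filter _
  rw [PySem.Set.ofList_eq_self_of_nodup _ hfilter_nd]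
  have hmain := foldl_add_if_filter (fun dx =>
      let n := min (max step 0) dx
      let x := n * dx - PySem.Int.floordiv (n * (n - 1)) 2
      decide (minx ≤ x ∧ x ≤ maxx)) (PySem.List.pyRange 0 (maxx + 1) 1) [] hnd (by simp)
  rw [List.nil_append] at hmain
  rw [← hmain]
  apply PySem.List.foldl_congr_mem
  intro acc dx hmem
  have hdx : 0 ≤ dx := ((PySem.List.mem_pyRange_one).1 hmem).1
  have hiff := decide_eq_decide.mp (cond_eq step minx maxx dx hdx)
  simp only [hiff, decide_eq_true_eq]
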